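-- pv_equiv track=rewrite | github.com/veluga29/python-async | 1.coroutine&async/cpu-bound-test.py | cpu_bound_function
-- ===== SOURCE A (Python) =====
-- def cpu_bound_function(num: int):
--     total = 0
--     arrange = range(1, num + 1)
--     for i in arrange:
--         for j in arrange:
--             for k in arrange:
--                 total += i + j + k
--
--     return total
-- ===== SOURCE B (Python) =====
-- def cpu_bound_function(num: int):
--     # closed form: sum over i,j,k in [1..num] of (i+j+k) = 3 * n^2 * n(n+1)/2
--     n = num if num > 0 else 0
--     return 3 * n * n * (n * (n + 1) // 2)
-- ===== Notes on version B (the rewrite author's own statement) =====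
-- stated objective: faster
-- what changed: replaces the cubic triple loop with a closed-form arithmetic formula for the sum
import Mathlib
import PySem

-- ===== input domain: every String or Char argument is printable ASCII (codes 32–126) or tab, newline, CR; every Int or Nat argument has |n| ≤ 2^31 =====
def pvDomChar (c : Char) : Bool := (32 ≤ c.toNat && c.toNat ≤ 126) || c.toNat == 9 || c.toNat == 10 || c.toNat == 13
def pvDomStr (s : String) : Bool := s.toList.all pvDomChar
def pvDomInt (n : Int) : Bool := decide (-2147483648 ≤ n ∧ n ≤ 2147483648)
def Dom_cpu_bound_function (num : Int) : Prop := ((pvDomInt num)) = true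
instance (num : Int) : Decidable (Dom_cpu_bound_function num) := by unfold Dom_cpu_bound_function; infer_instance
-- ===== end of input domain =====

-- B replaces A's cubic triple loop by a closed-form arithmetic formula (objective: faster).


-- ===== PORT A =====
def cpu_bound_function (num : Int) : Int :=
  let arrange := PySem.List.pyRange 1 (num + 1) 1
  arrange.foldl (fun total i =>
    arrange.foldl (fun total j =>
      arrange.foldl (fun total k => total + (i + j + k)) total) total) 0

-- ===== PORT B =====
def cpu_bound_function_alt (num : Int) : Int :=
  let n := if num > 0 then num else 0
  3 * n * n * (PySem.Int.floordiv (n * (n + 1)) 2)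

-- ===== PRECONDITION & SPEC =====
def Spec_cpu_bound_function (num : Int) (out : Int) : Prop := out = cpu_bound_function_alt num
instance (num : Int) (out : Int) : Decidable (Spec_cpu_bound_function num out) := by unfold Spec_cpu_bound_function; infer_instance

-- ===== CLAIM (what is proved, stated in full; the proofs are below) =====
def Claim_equal_cpu_bound_function : Prop := ∀ (num : Int), Dom_cpu_bound_function num → Spec_cpu_bound_function num (cpu_bound_function num)

-- ===== LEMMAS AND PROOFS =====

-- a fold that adds c + m*k for each element is affine in length and sum
theorem foldl_lin (c m : Int) : ∀ (l : List Int) (t : Int),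
    l.foldl (fun t k => t + (c + m * k)) t = t + (l.length : Int) * c + m * l.sum := by
  intro l
  induction l with
  | nil => intro t; simp
  | cons x xs ih => intro t; simp [List.foldl_cons, ih]; ring

theorem sum_range_one_add : ∀ (N : Nat),
    2 * (((List.range N).map (fun k : Nat => (1 : Int) + k)).sum) = (N : Int) * ((N : Int) + 1) := by
  intro N
  induction N with
  | zero => simp
  | succ n ih =>
    rw [List.range_succ, List.map_append, List.sum_append]
    simp only [List.map_cons, List.map_nil, List.sum_cons, List.sum_nil, add_zero]
    push_cast
    nlinarith [ih]


-- ===== VERDICT (by name: the statement is the Claim_ definition above) =====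
theorem cpu_bound_function_spec : Claim_equal_cpu_bound_function := by
  intro num _
  unfold Spec_cpu_bound_function cpu_bound_function cpu_bound_function_alt
  set l := PySem.List.pyRange 1 (num + 1) 1 with hl
  have hL : (l.length : Int) = if num > 0 then num else 0 := by
    rw [hl, PySem.List.length_pyRange_one]
    split_ifs with h <;> omega
  have hS : 2 * l.sum = (l.length : Int) * ((l.length : Int) + 1) := by
    rw [hl, PySem.List.pyRange_one, List.length_map, List.length_range]
    exact sum_range_one_add _
  set L : Int := (l.length : Int) with hLdef
  set S : Int := l.sum with hSdef
  have hinner : ∀ (i j t : Int),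
      l.foldl (fun t k => t + (i + j + k)) t = t + L * (i + j) + S := by
    intro i j t
    have : (fun t k => t + (i + j + k)) = (fun (t k : Int) => t + ((i + j) + 1 * k)) := by
      funext t k; ring
    rw [this, foldl_lin]; ring
  have hmid : ∀ (i t : Int),
      l.foldl (fun t j => l.foldl (fun t k => t + (i + j + k)) t) t
        = t + L * (L * i + S) + L * S := by
    intro i t
    have : (fun t j => l.foldl (fun t k => t + (i + j + k)) t)
         = (fun (t j : Int) => t + ((L * i + S) + L * j)) := by
      funext t j; rw [hinner]; ring
    rw [this, foldl_lin]
  have houter :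
      l.foldl (fun t i => l.foldl (fun t j => l.foldl (fun t k => t + (i + j + k)) t) t) 0
        = L * (2 * L * S) + L * L * S := by
    have : (fun t i => l.foldl (fun t j => l.foldl (fun t k => t + (i + j + k)) t) t)
         = (fun (t i : Int) => t + ((2 * L * S) + (L * L) * i)) := by
      funext t i; rw [hmid]; ring
    rw [this, foldl_lin]; ring
  rw [houter]
  have hfd : PySem.Int.floordiv ((if num > 0 then num else 0) * ((if num > 0 then num else 0) + 1)) 2 = S := by
    have h2 : (if num > 0 then num else 0) * ((if num > 0 then num else 0) + 1) = 2 * S := by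
      rw [← hL]; rw [hSdef]; omega
    rw [h2, PySem.Int.floordiv_eq_ediv_of_pos (by omega)]
    omega
  show L * (2 * L * S) + L * L * S
      = 3 * (if num > 0 then num else 0) * (if num > 0 then num else 0)
          * PySem.Int.floordiv ((if num > 0 then num else 0) * ((if num > 0 then num else 0) + 1)) 2
  rw [hfd, ← hL]
  ring
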